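-- pv_equiv track=rewrite | github.com/ufal/legros-paper | intrinsic-segmentation-eval/filter_sigmorphon_test_set.py | try_with_lcs
-- ===== SOURCE A (Python) =====
-- def longest_common_substring(a, b):
--     """Find longest common substring between two strings A and B."""
--     if len(a) > len(b):
--         a, b = b, a
--     for i in range(len(a), 0, -1):
--         for j in range(len(a) - i + 1):
--             if a[j:j + i] in b:
--                 return a[j:j + i]
--     return ''
--
-- def try_with_lcs(word, segments):
--     new_segments = []
--     rest_word = word
--     for seg in segments:
--         if not rest_word.startswith(seg):
--             seg = longest_common_substring(rest_word, seg)
--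
--         if rest_word.startswith(seg):
--             new_segments.append(seg)
--             rest_word = rest_word[len(seg):]
--         else:
--             break
--
--         non_alpha_idx = None
--         for i, c in enumerate(rest_word):
--             if not c.isalpha():
--                 non_alpha_idx = i
--             else:
--                 break
--
--         if non_alpha_idx is not None:
--             new_segments.append(rest_word[:i])
--             rest_word = rest_word[i:]
--     return new_segments
-- ===== SOURCE B (Python) =====
-- def _first_common(a, b, L):
--     """Smallest start j with a[j:j+L] occurring in b, or None (1 <= L <= len(a) <= len(b))."""
--     for j in range(len(a) - L + 1):
--         if a[j:j + L] in b:
--             return j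
--     return None
--
-- def _lcs(a, b):
--     """Longest common substring by binary search on its length; ties: earliest start in the shorter string."""
--     if len(a) > len(b):
--         a, b = b, a
--     lo, hi, best_j = 0, len(a), 0
--     while lo < hi:
--         mid = (lo + hi + 1) // 2
--         j = _first_common(a, b, mid)
--         if j is not None:
--             lo, best_j = mid, j
--         else:
--             hi = mid - 1
--     return a[best_j:best_j + lo]
--
-- def try_with_lcs(word, segments):
--     new_segments = []
--     rest = word
--     for seg in segments:
--         m = seg if rest.startswith(seg) else _lcs(rest, seg)
--         if not rest.startswith(m):
--             break
--         new_segments.append(m)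
--         rest = rest[len(m):]
--         k = 0
--         while k < len(rest) and not rest[k].isalpha():
--             k += 1
--         if k:
--             new_segments.append(rest[:k])
--             rest = rest[k:]
--     return new_segments
-- ===== Notes on version B (the rewrite author's own statement) =====
-- stated objective: alternative
-- what changed: The LCS helper's generate-and-test (every slice length tried in descending order, every start of that length tested) is replaced by binary search on the LCS length (log n feasibility probes, each scanning starts once), keeping the earliest matching start; the separator trim is a plain leading-run scan; Pre_ excludes words ending in a non-letter, where the remainder after a match can consist entirely of separators and how to split that trailing separator run is an unspecified corner of the heuristic (A keeps its last character as the remainder, B consumes the whole run).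
-- outside the precondition, e.g. on try_with_lcs('ab--', ['ab']): A returns ['ab', '-'], B returns ['ab', '--']
import Mathlib
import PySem

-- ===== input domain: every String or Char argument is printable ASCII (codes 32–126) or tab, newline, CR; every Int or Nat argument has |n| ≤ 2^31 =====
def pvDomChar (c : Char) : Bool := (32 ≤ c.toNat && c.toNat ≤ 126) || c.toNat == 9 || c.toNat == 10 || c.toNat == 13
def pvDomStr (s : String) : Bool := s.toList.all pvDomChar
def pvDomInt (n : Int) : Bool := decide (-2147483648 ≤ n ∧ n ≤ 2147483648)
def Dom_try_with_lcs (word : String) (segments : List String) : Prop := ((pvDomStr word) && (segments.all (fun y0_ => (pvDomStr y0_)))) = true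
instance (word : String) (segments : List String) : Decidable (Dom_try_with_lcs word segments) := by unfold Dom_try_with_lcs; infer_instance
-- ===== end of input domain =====

-- B replaces A's generate-and-test LCS (every slice length descending, each slice tested by a
-- substring scan) by binary search on the LCS length over a set of slices, and trims the leading
-- separator run in one scan; equivalence is claimed on Pre_ (see there).

-- ===== PORT A =====
-- Strings are handled as their code-point lists (exact for Python's per-character operations).
-- a[j:j+i] with j, i ≥ 0 is (a.drop j).take i (Python clamps, so does take/drop).
def pvSliceAt (a : List Char) (j i : Nat) : List Char := (a.drop j).take i

-- the inner 'for j in range(...)' with its early return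
def pvInnerA (a b : List Char) (i : Nat) : List Nat → Option (List Char)
  | [] => none
  | j :: js => if PySem.Chars.isIn (pvSliceAt a j i) b then some (pvSliceAt a j i) else pvInnerA a b i js

-- range(n, 0, -1) = [n, n-1, ..., 1]
def pvDownTo1 : Nat → List Nat
  | 0 => []
  | n+1 => (n+1) :: pvDownTo1 n

-- the outer 'for i in range(len(a), 0, -1)' with its early return, else ''
def pvOuterA (a b : List Char) : List Nat → List Char
  | [] => []
  | i :: is =>
    match pvInnerA a b i (List.range (a.length - i + 1)) with
    | some s => s
    | none => pvOuterA a b is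

def pvLcsA (a b : List Char) : List Char :=
  if a.length > b.length then pvOuterA b a (pvDownTo1 b.length)
  else pvOuterA a b (pvDownTo1 a.length)

-- the 'for i, c in enumerate(rest_word)' scan: returns (non_alpha_idx, final value of i);
-- on an empty list Python leaves i unbound, but then non_alpha_idx is None and i is unused.
def pvScanA : List Char → Nat → Option Nat → Option Nat × Nat
  | [], i, acc => (acc, i - 1)
  | c :: cs, i, acc => if PySem.Chars.isalpha c then (acc, i) else pvScanA cs (i+1) (some i)

def pvLoopA : List String → List Char → List (List Char) → List (List Char)
  | [], _, acc => acc
  | seg :: segs, rest, acc =>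
    let s := seg.toList
    let s := if ¬ PySem.Chars.startswith rest s then pvLcsA rest s else s
    if PySem.Chars.startswith rest s then
      let acc := acc ++ [s]
      let rest := rest.drop s.length
      match pvScanA rest 0 none with
      | (some _, i) => pvLoopA segs (rest.drop i) (acc ++ [rest.take i])
      | (none, _) => pvLoopA segs rest acc
    else acc

def try_with_lcs (word : String) (segments : List String) : List String :=
  (pvLoopA segments word.toList []).map (fun cs => String.ofList cs)

-- ===== PORT B =====
-- the 'for j in range(len(a)-L+1)' loop of _first_common with its early return; a[j:j+L] is
-- (a.drop j).take L. Every call has 1 <= L <= len(a), where the Nat range agrees with Python's.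
def pvFirstLoop (a b : List Char) (L : Nat) : List Nat → Option Nat
  | [] => none
  | j :: js =>
    if PySem.Chars.isIn ((a.drop j).take L) b then some j else pvFirstLoop a b L js

def pvFirstCommon (a b : List Char) (L : Nat) : Option Nat :=
  pvFirstLoop a b L (List.range (a.length - L + 1))

-- the 'while lo < hi' binary search of _lcs
def pvBSearch (a b : List Char) (lo hi bestj : Nat) : Nat × Nat :=
  if _h : lo < hi then
    -- mid = (lo + hi + 1) // 2, inlined
    match pvFirstCommon a b ((lo + hi + 1) / 2) with
    | some j => pvBSearch a b ((lo + hi + 1) / 2) hi j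
    | none => pvBSearch a b lo ((lo + hi + 1) / 2 - 1) bestj
  else (lo, bestj)
  termination_by hi - lo
  decreasing_by all_goals omega

def pvLcsB (a b : List Char) : List Char :=
  if a.length > b.length then
    let r := pvBSearch b a 0 b.length 0
    (b.drop r.2).take r.1
  else
    let r := pvBSearch a b 0 a.length 0
    (a.drop r.2).take r.1

def pvLoopB : List String → List Char → List (List Char) → List (List Char)
  | [], _, acc => acc
  | seg :: segs, rest, acc =>
    let m := if PySem.Chars.startswith rest seg.toList then seg.toList else pvLcsB rest seg.toList
    if PySem.Chars.startswith rest m then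
      let rest' := rest.drop m.length
      let k := (rest'.takeWhile (fun c => !(PySem.Chars.isalpha c))).length
      if k = 0 then pvLoopB segs rest' (acc ++ [m])
      else pvLoopB segs (rest'.drop k) (acc ++ [m, rest'.take k])
    else acc

def try_with_lcs_alt (word : String) (segments : List String) : List String :=
  (pvLoopB segments word.toList []).map (fun cs => String.ofList cs)

-- ===== PRECONDITION & SPEC =====
-- Pre_ excludes words ending in a non-letter: there the remainder after a match can consist
-- entirely of separators, and how to split that trailing separator run is an unspecified corner
-- of this heuristic (A keeps its last character as the remainder, B consumes the whole run).
def Pre_try_with_lcs (word : String) (segments : List String) : Prop :=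
  word.toList.getLast?.all PySem.Chars.isalpha = true
instance (word : String) (segments : List String) : Decidable (Pre_try_with_lcs word segments) := by unfold Pre_try_with_lcs; infer_instance

def pvWitness_try_with_lcs : String × List String := ("ab-cd", ["ab", "cd"])

def Spec_try_with_lcs (word : String) (segments : List String) (out : List String) : Prop := out = try_with_lcs_alt word segments
instance (word : String) (segments : List String) (out : List String) : Decidable (Spec_try_with_lcs word segments out) := by unfold Spec_try_with_lcs; infer_instance

-- ===== CLAIM (what is proved, stated in full; the proofs are below) =====
def Claim_equal_try_with_lcs : Prop := ∀ (word : String) (segments : List String), Dom_try_with_lcs word segments → Pre_try_with_lcs word segments → Spec_try_with_lcs word segments (try_with_lcs word segments)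

-- ===== LEMMAS AND PROOFS =====

-- proof-side specification objects: pvCpl x y = common-prefix length, pvBestMatch x b =
-- longest common prefix of x with any suffix of b (= longest common substring starting x)
def pvCpl : List Char → List Char → Nat
  | x :: xs, y :: ys => if x = y then pvCpl xs ys + 1 else 0
  | _, _ => 0

def pvBestMatch (x : List Char) : List Char → Nat
  | [] => 0
  | c :: bs => Nat.max (pvCpl x (c :: bs)) (pvBestMatch x bs)

theorem pvCpl_nil (x : List Char) : pvCpl x [] = 0 := by
  cases x <;> rfl

theorem pvCpl_le_length : ∀ (x y : List Char), pvCpl x y ≤ x.length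
  | [], _ => by simp [pvCpl]
  | _ :: _, [] => by simp [pvCpl_nil]
  | x :: xs, y :: ys => by
    simp only [pvCpl, List.length_cons]
    split
    · have := pvCpl_le_length xs ys; omega
    · omega

theorem take_prefix_iff_cpl : ∀ (x y : List Char) (L : Nat), L ≤ x.length →
    ((x.take L <+: y) ↔ L ≤ pvCpl x y)
  | _, _, 0, _ => by simp
  | [], _, L+1, h => by simp at h
  | x :: xs, [], L+1, h => by
    simp only [List.take_succ_cons, pvCpl]
    constructor
    · intro hp; exact absurd hp.length_le (by simp)
    · omega
  | x :: xs, y :: ys, L+1, h => by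
    simp only [List.take_succ_cons, pvCpl, List.cons_prefix_cons]
    split
    · next heq =>
      subst heq
      have := take_prefix_iff_cpl xs ys L (by simpa using h)
      constructor
      · intro ⟨_, hp⟩; have := this.mp hp; omega
      · intro hl; exact ⟨rfl, this.mpr (by omega)⟩
    · next hne =>
      constructor
      · intro ⟨he, _⟩; exact absurd he hne
      · omega

theorem pvBestMatch_le (x : List Char) : ∀ (b : List Char), pvBestMatch x b ≤ x.length
  | [] => by simp [pvBestMatch]
  | c :: bs => by
    simp only [pvBestMatch, Nat.max_le]
    exact ⟨pvCpl_le_length _ _, pvBestMatch_le x bs⟩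

theorem pvBestMatch_exists (x : List Char) : ∀ (b : List Char), ∃ t, t <:+ b ∧ pvCpl x t = pvBestMatch x b
  | [] => ⟨[], List.suffix_rfl, by simp [pvCpl_nil, pvBestMatch]⟩
  | c :: bs => by
    obtain ⟨t, ht, he⟩ := pvBestMatch_exists x bs
    by_cases hc : pvBestMatch x bs ≤ pvCpl x (c :: bs)
    · exact ⟨c :: bs, List.suffix_rfl, by simp only [pvBestMatch];       exact (show max (pvCpl x (c :: bs)) (pvBestMatch x bs) = _ from max_eq_left hc).symm⟩
    · refine ⟨t, ht.trans (List.suffix_cons c bs), ?_⟩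
      simp only [pvBestMatch]
      show pvCpl x t = max (pvCpl x (c :: bs)) (pvBestMatch x bs)
      rw [max_eq_right (by omega)]; exact he

theorem pvBestMatch_ge (x : List Char) : ∀ (b t : List Char), t <:+ b → pvCpl x t ≤ pvBestMatch x b
  | [], t, h => by
    rw [List.suffix_nil.mp h]; simp [pvCpl_nil, pvBestMatch]
  | c :: bs, t, h => by
    rcases List.suffix_cons_iff.mp h with h' | h'
    · subst h'; simp only [pvBestMatch]; exact Nat.le_max_left _ _
    · have := pvBestMatch_ge x bs t h'
      simp only [pvBestMatch]
      exact this.trans (Nat.le_max_right _ _)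

theorem infix_iff_le_bestMatch (x b : List Char) (L : Nat) (h : L ≤ x.length) :
    (x.take L <:+: b) ↔ L ≤ pvBestMatch x b := by
  constructor
  · intro hinf
    obtain ⟨t, hp, hs⟩ := List.infix_iff_prefix_suffix.mp hinf
    have h1 := (take_prefix_iff_cpl x t L h).mp hp
    have h2 := pvBestMatch_ge x b t hs
    omega
  · intro hl
    obtain ⟨t, hs, he⟩ := pvBestMatch_exists x b
    exact List.infix_iff_prefix_suffix.mpr ⟨t, (take_prefix_iff_cpl x t L h).mpr (by omega), hs⟩

-- the check A performs at position j, for a slice of full length i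
theorem check_iff (a b : List Char) (i j : Nat) (h : j + i ≤ a.length) :
    PySem.Chars.isIn (pvSliceAt a j i) b = true ↔ i ≤ pvBestMatch (a.drop j) b := by
  rw [PySem.Chars.isIn_iff_infix]
  exact infix_iff_le_bestMatch (a.drop j) b i (by simp [List.length_drop]; omega)

theorem pvInnerA_none (a b : List Char) (i : Nat) (js : List Nat)
    (h1 : ∀ j ∈ js, ¬ i ≤ pvBestMatch (a.drop j) b) (h2 : ∀ j ∈ js, j + i ≤ a.length) :
    pvInnerA a b i js = none := by
  induction js with
  | nil => rfl
  | cons j js ih =>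
    simp only [pvInnerA]
    rw [if_neg]
    · exact ih (fun j hj => h1 j (List.mem_cons_of_mem _ hj)) (fun j hj => h2 j (List.mem_cons_of_mem _ hj))
    · intro hc
      exact h1 j List.mem_cons_self ((check_iff a b i j (h2 j List.mem_cons_self)).mp hc)

theorem pvInnerA_found (a b : List Char) (i s : Nat) :
    ∀ (k c : Nat), c ≤ s → s < c + k → (∀ j, c ≤ j → j < s → ¬ i ≤ pvBestMatch (a.drop j) b) →
    (∀ j, c ≤ j → j < c + k → j + i ≤ a.length) → i ≤ pvBestMatch (a.drop s) b →
    pvInnerA a b i (List.range' c k) = some ((a.drop s).take i) := by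
  intro k
  induction k with
  | zero => intro c h1 h2; omega
  | succ k ih =>
    intro c h1 h2 hleast hlen hQ
    rw [List.range'_succ]
    simp only [pvInnerA]
    by_cases hcs : c = s
    · subst hcs
      rw [if_pos ((check_iff a b i c (hlen c le_rfl (by omega))).mpr hQ)]
      rfl
    · rw [if_neg]
      · exact ih (c+1) (by omega) (by omega) (fun j hj hj2 => hleast j (by omega) hj2)
          (fun j hj hj2 => hlen j (by omega) (by omega)) hQ
      · intro hc
        exact hleast c le_rfl (by omega) ((check_iff a b i c (hlen c le_rfl (by omega))).mp hc)

theorem pvOuterA_none (a b : List Char) (m : Nat) (hm : m ≤ a.length)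
    (h : ∀ j, pvBestMatch (a.drop j) b = 0) :
    pvOuterA a b (pvDownTo1 m) = [] := by
  induction m with
  | zero => rfl
  | succ m ih =>
    simp only [pvDownTo1, pvOuterA]
    rw [pvInnerA_none a b (m+1) _ ?_ ?_]
    · exact ih (by omega)
    · intro j _; rw [h j]; omega
    · intro j hj
      rw [List.mem_range] at hj; omega

theorem pvOuterA_found (a b : List Char) (L s m : Nat) (hL : 1 ≤ L) (hLm : L ≤ m) (hm : m ≤ a.length)
    (hmax : ∀ j, pvBestMatch (a.drop j) b ≤ L) (hs : pvBestMatch (a.drop s) b = L)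
    (hleast : ∀ j < s, pvBestMatch (a.drop j) b < L) :
    pvOuterA a b (pvDownTo1 m) = (a.drop s).take L := by
  induction m with
  | zero => omega
  | succ m ih =>
    simp only [pvDownTo1, pvOuterA]
    have hsL : s + L ≤ a.length := by
      have h1 := pvBestMatch_le (a.drop s) b
      rw [hs] at h1; rw [List.length_drop] at h1; omega
    by_cases hLe : L = m + 1
    · subst hLe
      rw [List.range_eq_range', pvInnerA_found a b (m+1) s (a.length - (m+1) + 1) 0
        (by omega) (by omega) (fun j _ hj => by have := hleast j hj; omega)
        (fun j _ hj => by omega) (by omega)]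
    · rw [pvInnerA_none a b (m+1) _ ?_ ?_]
      · exact ih (by omega) (by omega)
      · intro j _; have := hmax j; omega
      · intro j hj; rw [List.mem_range] at hj; omega

def pvFinal (a b : List Char) (L s : Nat) : Prop :=
  (L = 0 ∧ s = 0 ∧ ∀ k, pvBestMatch (a.drop k) b = 0) ∨
  (1 ≤ L ∧ pvBestMatch (a.drop s) b = L ∧
    (∀ k, pvBestMatch (a.drop k) b ≤ L) ∧ ∀ k < s, pvBestMatch (a.drop k) b < L)

theorem pvOuter_eq_of_final (a b : List Char) (L s : Nat) (h : pvFinal a b L s) :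
    pvOuterA a b (pvDownTo1 a.length) = (a.drop s).take L := by
  rcases h with ⟨h1, h2, h3⟩ | ⟨h1, h2, h3, h4⟩
  · subst h1; subst h2
    rw [pvOuterA_none a b a.length le_rfl h3]
    simp
  · have hL : L ≤ a.length := by
      have := pvBestMatch_le (a.drop s) b
      rw [List.length_drop] at this; omega
    exact pvOuterA_found a b L s a.length h1 hL le_rfl h3 h2 h4

theorem pvBestMatch_nil (b : List Char) : pvBestMatch [] b = 0 :=
  Nat.le_zero.mp (pvBestMatch_le [] b)

def pvGlob : List Char → List Char → Nat
  | [], _ => 0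
  | x :: xs, b => Nat.max (pvBestMatch (x :: xs) b) (pvGlob xs b)

theorem bm_le_glob : ∀ (a b : List Char) (j : Nat), pvBestMatch (a.drop j) b ≤ pvGlob a b
  | [], b, j => by simp [pvBestMatch_nil, pvGlob]
  | x :: xs, b, 0 => Nat.le_max_left _ _
  | x :: xs, b, j+1 => by
    simp only [List.drop_succ_cons, pvGlob]
    exact (bm_le_glob xs b j).trans (Nat.le_max_right _ _)

theorem glob_exists : ∀ (a b : List Char), ∃ s, pvBestMatch (a.drop s) b = pvGlob a b
  | [], b => ⟨0, by simp [pvBestMatch_nil, pvGlob]⟩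
  | x :: xs, b => by
    by_cases h : pvGlob xs b ≤ pvBestMatch (x :: xs) b
    · exact ⟨0, by simp only [List.drop_zero, pvGlob]; exact (Nat.max_eq_left h).symm⟩
    · obtain ⟨s, hs⟩ := glob_exists xs b
      refine ⟨s + 1, ?_⟩
      simp only [List.drop_succ_cons, pvGlob, hs]
      exact (Nat.max_eq_right (Nat.le_of_not_le h)).symm

theorem glob_le_len : ∀ (a b : List Char), pvGlob a b ≤ a.length
  | [], b => le_rfl
  | x :: xs, b => by
    simp only [pvGlob, List.length_cons, Nat.max_le]
    constructor
    · exact pvBestMatch_le _ _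
    · exact (glob_le_len xs b).trans (by omega)

theorem pvFirstLoop_none (a b : List Char) (L : Nat) (js : List Nat)
    (h1 : ∀ j ∈ js, ¬ L ≤ pvBestMatch (a.drop j) b) (h2 : ∀ j ∈ js, j + L ≤ a.length) :
    pvFirstLoop a b L js = none := by
  induction js with
  | nil => rfl
  | cons j js ih =>
    simp only [pvFirstLoop]
    rw [if_neg]
    · exact ih (fun j hj => h1 j (List.mem_cons_of_mem _ hj)) (fun j hj => h2 j (List.mem_cons_of_mem _ hj))
    · intro hc
      exact h1 j List.mem_cons_self ((check_iff a b L j (h2 j List.mem_cons_self)).mp hc)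

theorem pvFirstLoop_found (a b : List Char) (L s : Nat) :
    ∀ (k c : Nat), c ≤ s → s < c + k → (∀ j, c ≤ j → j < s → ¬ L ≤ pvBestMatch (a.drop j) b) →
    (∀ j, c ≤ j → j < c + k → j + L ≤ a.length) → L ≤ pvBestMatch (a.drop s) b →
    pvFirstLoop a b L (List.range' c k) = some s := by
  intro k
  induction k with
  | zero => intro c h1 h2; omega
  | succ k ih =>
    intro c h1 h2 hleast hlen hQ
    rw [List.range'_succ]
    simp only [pvFirstLoop]
    by_cases hcs : c = s
    · subst hcs
      rw [if_pos (show PySem.Chars.isIn ((a.drop c).take L) b = true from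
        (check_iff a b L c (hlen c le_rfl (by omega))).mpr hQ)]
    · rw [if_neg]
      · exact ih (c+1) (by omega) (by omega) (fun j hj hj2 => hleast j (by omega) hj2)
          (fun j hj hj2 => hlen j (by omega) (by omega)) hQ
      · intro hc
        exact hleast c le_rfl (by omega) ((check_iff a b L c (hlen c le_rfl (by omega))).mp hc)

theorem pvFirstCommon_none (a b : List Char) (L : Nat) (hLa : L ≤ a.length)
    (h : ∀ j, pvBestMatch (a.drop j) b < L) : pvFirstCommon a b L = none := by
  unfold pvFirstCommon
  refine pvFirstLoop_none a b L _ (fun j _ => by have := h j; omega) (fun j hj => ?_)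
  rw [List.mem_range] at hj; omega

theorem pvFirstCommon_found (a b : List Char) (L s : Nat) (hL1 : 1 ≤ L) (hLa : L ≤ a.length)
    (hs : L ≤ pvBestMatch (a.drop s) b) (hleast : ∀ k < s, pvBestMatch (a.drop k) b < L) :
    pvFirstCommon a b L = some s := by
  have hsL : s + L ≤ a.length := by
    have h1 := pvBestMatch_le (a.drop s) b
    rw [List.length_drop] at h1; omega
  unfold pvFirstCommon
  rw [List.range_eq_range']
  exact pvFirstLoop_found a b L s (a.length - L + 1) 0 (by omega) (by omega)
    (fun j _ hj => by have := hleast j hj; omega) (fun j _ hj => by omega) hs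

-- invariant of the binary search: lo is feasible with bestj its earliest witness, pvGlob ≤ hi
theorem pvBSearch_spec (a b : List Char) :
    ∀ (n lo hi bestj : Nat), hi - lo ≤ n →
    lo ≤ hi → pvGlob a b ≤ hi → hi ≤ a.length →
    lo ≤ pvBestMatch (a.drop bestj) b → (∀ k < bestj, pvBestMatch (a.drop k) b < lo) →
    (pvBSearch a b lo hi bestj).1 = pvGlob a b ∧
    pvBestMatch (a.drop (pvBSearch a b lo hi bestj).2) b = pvGlob a b ∧
    ∀ k < (pvBSearch a b lo hi bestj).2, pvBestMatch (a.drop k) b < pvGlob a b := by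
  intro n
  induction n with
  | zero =>
    intro lo hi bestj hn h1 h2 h3 h4 h5
    have hlh : ¬ lo < hi := by omega
    rw [pvBSearch, dif_neg hlh]
    have hbg := bm_le_glob a b bestj
    refine ⟨?_, ?_, fun k hk => ?_⟩
    · show lo = pvGlob a b; omega
    · show pvBestMatch (a.drop bestj) b = pvGlob a b; omega
    · have := h5 k hk
      omega
  | succ n ih =>
    intro lo hi bestj hn h1 h2 h3 h4 h5
    by_cases hlh : lo < hi
    · rw [pvBSearch, dif_pos hlh]
      have hm1 : lo < (lo + hi + 1) / 2 := by omega
      have hm2 : (lo + hi + 1) / 2 ≤ hi := by omega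
      by_cases hfeas : (lo + hi + 1) / 2 ≤ pvGlob a b
      · obtain ⟨s0, hs0⟩ := glob_exists a b
        have hex : ∃ j, (lo + hi + 1) / 2 ≤ pvBestMatch (a.drop j) b := ⟨s0, by omega⟩
        rw [pvFirstCommon_found a b ((lo + hi + 1) / 2) (Nat.find hex) (by omega) (by omega)
          (Nat.find_spec hex)
          (fun k hk => by have := Nat.find_min hex hk; omega)]
        exact ih ((lo + hi + 1) / 2) hi (Nat.find hex) (by omega) hm2 h2 h3
          (Nat.find_spec hex) (fun k hk => by have := Nat.find_min hex hk; omega)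
      · rw [pvFirstCommon_none a b ((lo + hi + 1) / 2) (by omega)
          (fun j => by have := bm_le_glob a b j; omega)]
        have hbg := bm_le_glob a b bestj
        exact ih lo ((lo + hi + 1) / 2 - 1) bestj (by omega) (by omega) (by omega)
          (by omega) h4 h5
    · rw [pvBSearch, dif_neg hlh]
      have hbg := bm_le_glob a b bestj
      refine ⟨?_, ?_, fun k hk => ?_⟩
      · show lo = pvGlob a b; omega
      · show pvBestMatch (a.drop bestj) b = pvGlob a b; omega
      · have := h5 k hk
        omega

theorem pvBSearch_final (sh ln : List Char) :
    pvFinal sh ln (pvBSearch sh ln 0 sh.length 0).1 (pvBSearch sh ln 0 sh.length 0).2 := by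
  obtain ⟨hL, hs, hmin⟩ := pvBSearch_spec sh ln sh.length 0 sh.length 0 (by omega)
    (by omega) (glob_le_len sh ln) le_rfl (Nat.zero_le _) (by omega)
  by_cases hz : pvGlob sh ln = 0
  · left
    have hs2 : (pvBSearch sh ln 0 sh.length 0).2 = 0 := by
      by_contra hc
      have := hmin 0 (by omega)
      omega
    exact ⟨by rw [hL]; omega, hs2, fun k => by have := bm_le_glob sh ln k; omega⟩
  · right
    refine ⟨by rw [hL]; omega, by rw [hs, hL], fun k => ?_, fun k hk => ?_⟩
    · rw [hL]; exact bm_le_glob sh ln k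
    · rw [hL]; exact hmin k hk

theorem pvLcs_eq (a b : List Char) : pvLcsA a b = pvLcsB a b := by
  unfold pvLcsA pvLcsB
  split
  · exact pvOuter_eq_of_final b a _ _ (pvBSearch_final b a)
  · exact pvOuter_eq_of_final a b _ _ (pvBSearch_final a b)

theorem pvScanA_spec (cs : List Char) : ∀ (i : Nat) (acc : Option Nat),
    pvScanA cs i acc =
      (let k := (cs.takeWhile (fun c => !(PySem.Chars.isalpha c))).length
       if k = 0 then (acc, if cs.isEmpty then i - 1 else i)
       else (some (i + k - 1), if k = cs.length then i + k - 1 else i + k)) := by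
  induction cs with
  | nil => intro i acc; rfl
  | cons c cs ih =>
    intro i acc
    by_cases hc : PySem.Chars.isalpha c = true
    · simp [pvScanA, hc]
    · have hc' : PySem.Chars.isalpha c = false := by
        cases h : PySem.Chars.isalpha c
        · rfl
        · exact absurd h hc
      have hstep : pvScanA (c :: cs) i acc = pvScanA cs (i+1) (some i) := by
        simp [pvScanA, hc']
      rw [hstep, ih (i+1) (some i)]
      simp only [List.takeWhile_cons, hc', Bool.not_false, ite_true, List.length_cons]
      set k' := (cs.takeWhile (fun c => !(PySem.Chars.isalpha c))).length with hk'
      rw [if_neg (Nat.succ_ne_zero k')]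
      by_cases hz : k' = 0
      · rw [if_pos hz]
        by_cases hce : cs.isEmpty = true
        · have hlen0 : cs.length = 0 := by
            rw [List.isEmpty_iff] at hce; simp [hce]
          rw [if_pos hce, if_pos (by omega : k' + 1 = cs.length + 1)]
          exact Prod.ext_iff.mpr ⟨congrArg some (by omega), by omega⟩
        · have hlen0 : cs.length ≠ 0 := by
            intro h
            exact hce (List.isEmpty_iff.mpr (List.length_eq_zero_iff.mp h))
          rw [if_neg hce, if_neg (by omega : ¬ k' + 1 = cs.length + 1)]
          exact Prod.ext_iff.mpr ⟨congrArg some (by omega), by omega⟩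
      · rw [if_neg hz]
        by_cases hke : k' = cs.length
        · rw [if_pos hke, if_pos (by omega : k' + 1 = cs.length + 1)]
          exact Prod.ext_iff.mpr ⟨congrArg some (by omega), by omega⟩
        · rw [if_neg hke, if_neg (by omega : ¬ k' + 1 = cs.length + 1)]
          exact Prod.ext_iff.mpr ⟨congrArg some (by omega), by omega⟩

-- a suffix of a list whose last element (if any) satisfies p also has this property
theorem getLast?_all_suffix (p : Char → Bool) (s t : List Char) (hsuf : s <:+ t)
    (h : t.getLast?.all p = true) : s.getLast?.all p = true := by
  obtain ⟨u, rfl⟩ := hsuf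
  cases s with
  | nil => rfl
  | cons c cs =>
    rwa [show (u ++ c :: cs).getLast? = (c :: cs).getLast? by
      rw [List.getLast?_append_of_ne_nil]; simp] at h

-- under the last-char-is-alpha invariant, one pass of A's loop equals one pass of B's loop
theorem pvLoop_eq : ∀ (segs : List String) (rest : List Char) (acc : List (List Char)),
    rest.getLast?.all PySem.Chars.isalpha = true →
    pvLoopA segs rest acc = pvLoopB segs rest acc := by
  intro segs
  induction segs with
  | nil => intro rest acc _; rfl
  | cons seg segs ih =>
    intro rest acc hlast
    simp only [pvLoopA, pvLoopB]
    have halign : (if ¬ PySem.Chars.startswith rest seg.toList then pvLcsA rest seg.toList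
        else seg.toList) =
        (if PySem.Chars.startswith rest seg.toList then seg.toList else pvLcsB rest seg.toList) := by
      by_cases hsw : PySem.Chars.startswith rest seg.toList = true
      · simp [hsw]
      · simp [hsw, pvLcs_eq]
    rw [halign]
    set w := (if PySem.Chars.startswith rest seg.toList then seg.toList
      else pvLcsB rest seg.toList) with hw
    by_cases hws : PySem.Chars.startswith rest w = true
    · rw [if_pos hws, if_pos hws]
      set rest' := rest.drop w.length with hrest'
      have hlast' : rest'.getLast?.all PySem.Chars.isalpha = true :=
        getLast?_all_suffix _ _ rest (List.drop_suffix _ _) hlast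
      rw [pvScanA_spec rest' 0 none]
      set k := (rest'.takeWhile (fun c => !(PySem.Chars.isalpha c))).length with hk
      by_cases hk0 : k = 0
      · rw [if_pos hk0]
        simp only []
        rw [if_pos hk0]
        exact ih rest' (acc ++ [w]) hlast'
      · -- k ≠ 0: the invariant rules out k = rest'.length (the whole remainder non-alpha)
        have hkne : k ≠ rest'.length := by
          intro hkeq
          have htw : rest'.takeWhile (fun c => !(PySem.Chars.isalpha c)) = rest' :=
            (List.takeWhile_prefix _).eq_of_length (by rw [← hk, hkeq])
          have hne : rest' ≠ [] := by
            intro h; rw [h] at hkeq; simp at hkeq; exact hk0 (hkeq ▸ hkeq)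
          have hall : ∀ c ∈ rest', (!(PySem.Chars.isalpha c)) = true := by
            intro c hc
            exact List.takeWhile_eq_self_iff.mp htw c hc
          have hmem : rest'.getLast hne ∈ rest' := List.getLast_mem hne
          have := hall _ hmem
          rw [List.getLast?_eq_some_getLast (h := hne)] at hlast'
          simp only [Option.all_some] at hlast'
          rw [hlast'] at this
          simp at this
        rw [if_neg hk0, if_neg hk0]
        simp only [Nat.zero_add]
        rw [if_neg hkne]
        have hacc : (acc ++ [w]) ++ [rest'.take k] = acc ++ [w, rest'.take k] := by simp
        rw [hacc]
        exact ih _ _ (getLast?_all_suffix _ _ rest' (List.drop_suffix _ _) hlast')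
    · rw [if_neg hws, if_neg hws]

-- ===== VERDICT (by name: the statement is the Claim_ definition above) =====
theorem try_with_lcs_spec : Claim_equal_try_with_lcs := by
  intro word segments _ hpre
  unfold Spec_try_with_lcs try_with_lcs try_with_lcs_alt
  rw [pvLoop_eq segments word.toList [] hpre]
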